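-- pv_equiv track=rewrite | github.com/bh-premnath-git/apache-superset-1 | superset-extensions/dashboard-chatbot/backend/src/my_org/dashboard_chatbot/entrypoint.py | _pick_tool_name
-- ===== SOURCE A (Python) =====
-- def _pick_tool_name(intent: str, tool_names: list[str]) -> str | None:
--     preferred: dict[str, tuple[str, ...]] = {
--         "dashboard": ("list_dashboards", "search_dashboards", "get_dashboard_info"),
--         "chart": ("list_charts", "search_charts", "get_chart_info"),
--         "dataset": ("list_datasets", "search_datasets", "get_dataset_info"),
--         "database": ("list_databases", "search_databases", "get_database_info"),
--     }
--     for candidate in preferred.get(intent, ()):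
--         if candidate in tool_names:
--             return candidate
--     intent_token = f"{intent}s"
--     for name in tool_names:
--         lowered = name.lower()
--         if lowered.startswith("list_") and intent_token in lowered:
--             return name
--     for name in tool_names:
--         lowered = name.lower()
--         if lowered.startswith("search_") and intent_token in lowered:
--             return name
--     return None
-- ===== SOURCE B (Python) =====
-- def _pick_tool_name(intent: str, tool_names: list[str]) -> str | None:
--     preferred: dict[str, tuple[str, ...]] = {
--         "dashboard": ("list_dashboards", "search_dashboards", "get_dashboard_info"),
--         "chart": ("list_charts", "search_charts", "get_chart_info"),
--         "dataset": ("list_datasets", "search_datasets", "get_dataset_info"),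
--         "database": ("list_databases", "search_databases", "get_database_info"),
--     }
--     for candidate in preferred.get(intent, ()):
--         if candidate in tool_names:
--             return candidate
--     token = f"{intent}s"
--     list_hit = None
--     search_hit = None
--     for name in tool_names:
--         lowered = name.lower()
--         if token in lowered:
--             if list_hit is None and lowered.startswith("list_"):
--                 list_hit = name
--             if search_hit is None and lowered.startswith("search_"):
--                 search_hit = name
--     return list_hit if list_hit is not None else search_hit
-- ===== Notes on version B (the rewrite author's own statement) =====
-- stated objective: simpler
-- what changed: The two separate full scans of tool_names (first for 'list_' matches, then for 'search_' matches) are fused into one pass that remembers the first candidate of each kind in two slots and picks list over search afterwards.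
import Mathlib
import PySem

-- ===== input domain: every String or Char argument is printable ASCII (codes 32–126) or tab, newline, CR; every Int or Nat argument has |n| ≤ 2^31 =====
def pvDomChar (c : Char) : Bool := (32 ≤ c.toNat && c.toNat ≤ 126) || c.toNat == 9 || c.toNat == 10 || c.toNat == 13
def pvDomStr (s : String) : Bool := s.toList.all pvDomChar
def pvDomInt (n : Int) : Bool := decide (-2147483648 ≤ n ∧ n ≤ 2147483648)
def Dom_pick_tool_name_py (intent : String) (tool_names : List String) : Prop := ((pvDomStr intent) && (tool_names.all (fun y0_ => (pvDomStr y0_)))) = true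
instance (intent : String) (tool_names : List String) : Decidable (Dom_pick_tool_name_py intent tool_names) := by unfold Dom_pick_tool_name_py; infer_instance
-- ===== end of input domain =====

-- B fuses A's two separate scans of tool_names into one pass keeping two first-hit slots (objective: simpler).

-- shared by both ports: the `preferred` dict literal and the first loop, identical in A and B
def preferredCfg : PySem.Dict String (List String) :=
  PySem.Dict.ofList
    [ ("dashboard", ["list_dashboards", "search_dashboards", "get_dashboard_info"])
    , ("chart", ["list_charts", "search_charts", "get_chart_info"])
    , ("dataset", ["list_datasets", "search_datasets", "get_dataset_info"])
    , ("database", ["list_databases", "search_databases", "get_database_info"]) ]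

-- 'for candidate in preferred.get(intent, ()): if candidate in tool_names: return candidate'
def pickPreferred (cands : List String) (tool_names : List String) : Option String :=
  match cands with
  | [] => none
  | c :: rest => if tool_names.contains c then some c else pickPreferred rest tool_names

-- ===== PORT A =====
-- 'for name in tool_names: if lowered.startswith("list_") and intent_token in lowered: return name'
def findListA (token : String) : List String → Option String
  | [] => none
  | n :: rest =>
    let lowered := PySem.Str.lower n
    if PySem.Str.startswith lowered "list_" && PySem.Str.isIn token lowered then some n
    else findListA token rest

-- 'for name in tool_names: if lowered.startswith("search_") and intent_token in lowered: return name'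
def findSearchA (token : String) : List String → Option String
  | [] => none
  | n :: rest =>
    let lowered := PySem.Str.lower n
    if PySem.Str.startswith lowered "search_" && PySem.Str.isIn token lowered then some n
    else findSearchA token rest

def pick_tool_name_py (intent : String) (tool_names : List String) : Option String :=
  match pickPreferred (PySem.Dict.getD preferredCfg intent []) tool_names with
  | some c => some c
  | none =>
    let intent_token := intent ++ "s"
    match findListA intent_token tool_names with
    | some n => some n
    | none => findSearchA intent_token tool_names

-- ===== PORT B =====
-- single pass: two first-hit slots (list_hit, search_hit), updated only while still None
def scanB (token : String) : List String → Option String × Option String → Option String × Option String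
  | [], st => st
  | n :: rest, (l, s) =>
    let lowered := PySem.Str.lower n
    if PySem.Str.isIn token lowered then
      let l' := if l.isNone && PySem.Str.startswith lowered "list_" then some n else l
      let s' := if s.isNone && PySem.Str.startswith lowered "search_" then some n else s
      scanB token rest (l', s')
    else scanB token rest (l, s)

def pick_tool_name_py_alt (intent : String) (tool_names : List String) : Option String :=
  match pickPreferred (PySem.Dict.getD preferredCfg intent []) tool_names with
  | some c => some c
  | none =>
    let token := intent ++ "s"
    match scanB token tool_names (none, none) with
    | (some x, _) => some x
    | (none, s) => s

-- ===== PRECONDITION & SPEC =====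
def Spec_pick_tool_name_py (intent : String) (tool_names : List String) (out : Option String) : Prop := out = pick_tool_name_py_alt intent tool_names
instance (intent : String) (tool_names : List String) (out : Option String) : Decidable (Spec_pick_tool_name_py intent tool_names out) := by unfold Spec_pick_tool_name_py; infer_instance

-- ===== CLAIM (what is proved, stated in full; the proofs are below) =====
def Claim_equal_pick_tool_name_py : Prop := ∀ (intent : String) (tool_names : List String), Dom_pick_tool_name_py intent tool_names → Spec_pick_tool_name_py intent tool_names (pick_tool_name_py intent tool_names)

-- ===== LEMMAS AND PROOFS =====

-- invariant of the fused pass: each slot is its old value or-else the first hit of its kind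
theorem scanB_eq (token : String) (xs : List String) (l s : Option String) :
    scanB token xs (l, s) = (l.or (findListA token xs), s.or (findSearchA token xs)) := by
  induction xs generalizing l s with
  | nil => simp [scanB, findListA, findSearchA]
  | cons n rest ih =>
    by_cases hin : PySem.Chars.isIn token.toList (PySem.Chars.lower n.toList) = true
    · by_cases hl : PySem.Chars.startswith (PySem.Chars.lower n.toList) ['l', 'i', 's', 't', '_'] = true <;>
        by_cases hs : PySem.Chars.startswith (PySem.Chars.lower n.toList) ['s', 'e', 'a', 'r', 'c', 'h', '_'] = true <;>
        cases l <;> cases s <;>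
        simp [scanB, findListA, findSearchA, hin, hl, hs, ih, Option.or]
    · simp [scanB, findListA, findSearchA, hin, ih]

-- ===== VERDICT (by name: the statement is the Claim_ definition above) =====
theorem pick_tool_name_py_spec : Claim_equal_pick_tool_name_py := by
  intro intent tool_names _
  unfold Spec_pick_tool_name_py pick_tool_name_py pick_tool_name_py_alt
  cases pickPreferred (PySem.Dict.getD preferredCfg intent []) tool_names with
  | some c => rfl
  | none =>
    simp only [scanB_eq, Option.or]
    cases findListA (intent ++ "s") tool_names <;> rfl
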